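-- pv_equiv track=rewrite | github.com/johnnybravo202020/Horsing-Around | gui/scrapper/view_models.py | prettify_keys
-- ===== SOURCE A (Python) =====
-- def prettify_keys(keys):
--     _keys = list()
--     for key in keys:
--         # Split by the underscore
--         words = key.split('_')
--         # Capitalize the first letter of each word and build the string
--         _key = ''
--         for word in words:
--             _key += word.title() + ' '
--
--         # Add the key to the return list
--         _keys.append(_key)
--     return _keys
-- ===== SOURCE B (Python) =====
-- def prettify_keys(keys):
--     # One-pass state machine per key: no split, no inner word list.
--     # '_' becomes ' ' and resets the "previous char was cased" flag;
--     # a letter is uppercased after a non-cased char, lowercased otherwise.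
--     result = []
--     for key in keys:
--         buf = []
--         prev = False
--         for c in key:
--             if c == '_':
--                 buf.append(' ')
--                 prev = False
--             elif 'a' <= c <= 'z' or 'A' <= c <= 'Z':
--                 buf.append(c.lower() if prev else c.upper())
--                 prev = True
--             else:
--                 buf.append(c)
--                 prev = False
--         result.append(''.join(buf) + ' ')
--     return result
-- ===== Notes on version B (the rewrite author's own statement) =====
-- stated objective: alternative
-- what changed: B replaces A's split-by-underscore plus inner per-word loop with a single-pass per-key state machine that tracks whether the previous character was a letter, emitting ' ' for '_' and upper/lower-casing letters on the fly, then appends the trailing space once.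
import Mathlib
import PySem

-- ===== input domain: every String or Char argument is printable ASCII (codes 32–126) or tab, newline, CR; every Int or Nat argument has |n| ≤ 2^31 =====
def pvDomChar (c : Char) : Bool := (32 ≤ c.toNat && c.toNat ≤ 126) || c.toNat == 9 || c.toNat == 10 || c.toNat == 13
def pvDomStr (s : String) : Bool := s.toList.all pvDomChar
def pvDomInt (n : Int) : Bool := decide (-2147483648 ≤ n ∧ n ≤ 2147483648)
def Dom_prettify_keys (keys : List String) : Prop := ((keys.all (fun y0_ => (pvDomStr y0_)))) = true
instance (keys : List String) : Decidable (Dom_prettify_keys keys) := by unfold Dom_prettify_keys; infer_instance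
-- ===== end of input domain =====

-- B replaces A's split('_') + inner per-word loop with a one-pass state machine per key
-- (flag = "previous char was cased"), appending one trailing space: same output, alternative decomposition.


-- ===== PORT A =====
-- A-side helper: Python str.title(), hand-ported (PySem has no title); exact on the
-- ASCII domain: a cased (ASCII letter) char is uppercased after a non-cased char and
-- lowercased after a cased char, non-letters pass through.
def pvIsCased (c : Char) : Bool := (65 ≤ c.toNat && c.toNat ≤ 90) || (97 ≤ c.toNat && c.toNat ≤ 122)
def pvUpChar (c : Char) : Char := if 97 ≤ c.toNat && c.toNat ≤ 122 then Char.ofNat (c.toNat - 32) else c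
def pvLoChar (c : Char) : Char := if 65 ≤ c.toNat && c.toNat ≤ 90 then Char.ofNat (c.toNat + 32) else c
def pvTitleChar (p : Bool) (c : Char) : Char := if pvIsCased c then (if p then pvLoChar c else pvUpChar c) else c
def pvTitle : Bool → List Char → List Char
  | _, [] => []
  | p, c :: cs => pvTitleChar p c :: pvTitle (pvIsCased c) cs

def prettify_keys (keys : List String) : List String :=
  keys.foldl (fun _keys key =>
    let words := PySem.Chars.splitOn key.toList ['_']          -- key.split('_')
    let _key := words.foldl (fun k w => k ++ pvTitle false w ++ [' ']) ([] : List Char)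
    _keys ++ [String.ofList _key]) []

-- ===== PORT B =====
-- B-side helpers: c.upper() / c.lower() on a single char (exact on the ASCII domain),
-- and the per-char state-machine step of Source B's inner loop (state = (buf, prev)).
def bUp (c : Char) : Char := if 'a' ≤ c ∧ c ≤ 'z' then Char.ofNat (c.toNat - 32) else c
def bLo (c : Char) : Char := if 'A' ≤ c ∧ c ≤ 'Z' then Char.ofNat (c.toNat + 32) else c
def bStep (st : List Char × Bool) (c : Char) : List Char × Bool :=
  if c = '_' then (st.1 ++ [' '], false)
  else if ('a' ≤ c ∧ c ≤ 'z') ∨ ('A' ≤ c ∧ c ≤ 'Z') then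
    (st.1 ++ [if st.2 then bLo c else bUp c], true)
  else (st.1 ++ [c], false)

def prettify_keys_alt (keys : List String) : List String :=
  keys.map (fun key => String.ofList ((key.toList.foldl bStep ([], false)).1 ++ [' ']))

-- ===== PRECONDITION & SPEC =====
def Spec_prettify_keys (keys : List String) (out : List String) : Prop := out = prettify_keys_alt keys
instance (keys : List String) (out : List String) : Decidable (Spec_prettify_keys keys out) := by unfold Spec_prettify_keys; infer_instance

-- ===== CLAIM (what is proved, stated in full; the proofs are below) =====
def Claim_equal_prettify_keys : Prop := ∀ (keys : List String), Dom_prettify_keys keys → Spec_prettify_keys keys (prettify_keys keys)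

-- ===== LEMMAS AND PROOFS =====

-- substituting '_' by ' ' pointwise
def pvSub (c : Char) : Char := if c = '_' then ' ' else c
-- A's split('_'), as a forward structural recursion (cur = word accumulated so far)
def pvSplitRec : List Char → List Char → List (List Char)
  | cur, [] => [cur]
  | cur, c :: rest => if c = '_' then cur :: pvSplitRec [] rest else pvSplitRec (cur ++ [c]) rest
-- the title-case "previous char was cased" flag after scanning xs, starting from p
def pvFlag (p : Bool) (xs : List Char) : Bool := xs.foldl (fun _ c => pvIsCased c) p

theorem pvOfNat_toNat (n : Nat) (h : n < 55296) : (Char.ofNat n).toNat = n := by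
  rw [Char.toNat_ofNat, if_pos (Or.inl h)]

theorem pvUpChar_ne_underscore (c : Char) (h : c ≠ '_') : pvUpChar c ≠ '_' := by
  unfold pvUpChar
  split_ifs with h1
  · simp only [Bool.and_eq_true, decide_eq_true_eq] at h1
    intro he; have ht := congrArg Char.toNat he
    rw [pvOfNat_toNat _ (by omega)] at ht
    have h95 : ('_').toNat = 95 := rfl
    omega
  · exact h

theorem pvLoChar_ne_underscore (c : Char) (h : c ≠ '_') : pvLoChar c ≠ '_' := by
  unfold pvLoChar
  split_ifs with h1
  · simp only [Bool.and_eq_true, decide_eq_true_eq] at h1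
    intro he; have ht := congrArg Char.toNat he
    rw [pvOfNat_toNat _ (by omega)] at ht
    have h95 : ('_').toNat = 95 := rfl
    omega
  · exact h

theorem pvTitleChar_ne_underscore (p : Bool) (c : Char) (h : c ≠ '_') : pvTitleChar p c ≠ '_' := by
  unfold pvTitleChar
  split_ifs with h1 h2
  · exact pvLoChar_ne_underscore c h
  · exact pvUpChar_ne_underscore c h
  · exact h

theorem pvTitleChar_underscore (p : Bool) : pvTitleChar p '_' = '_' := by
  cases p <;> decide

theorem pvSub_titleChar (p : Bool) (c : Char) (h : c ≠ '_') : pvSub (pvTitleChar p c) = pvTitleChar p c := by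
  unfold pvSub
  rw [if_neg (pvTitleChar_ne_underscore p c h)]

-- splitOn with separator "_" is pvSplitRec
theorem pvSplitOn_go_underscore : ∀ (l : List Char) (fuel : Nat) (cur : List Char) (acc : List (List Char)),
    l.length < fuel →
    PySem.Chars.splitOn.go ['_'] fuel l cur acc = acc.reverse ++ pvSplitRec cur.reverse l := by
  intro l
  induction l with
  | nil =>
    intro fuel cur acc h
    cases fuel with
    | zero => omega
    | succ f =>
      rw [PySem.Chars.splitOn.go.eq_def]
      simp [pvSplitRec]
  | cons c t ih =>
    intro fuel cur acc h
    cases fuel with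
    | zero => omega
    | succ f =>
      rw [PySem.Chars.splitOn.go.eq_def]
      simp only [List.isPrefixOf, Bool.and_true, List.length_cons, List.length_nil,
        List.drop_succ_cons, List.drop_zero]
      by_cases hc : '_' == c
      · rw [if_pos hc]
        have hcu : c = '_' := (beq_iff_eq.mp hc).symm
        rw [ih f [] (cur.reverse :: acc) (by simp only [List.length_cons] at h; omega)]
        simp [pvSplitRec, hcu]
      · rw [if_neg (by simpa using hc)]
        have hcu : ¬ c = '_' := fun hh => hc (beq_iff_eq.mpr hh.symm)
        rw [ih f (c :: cur) acc (by simp only [List.length_cons] at h; omega)]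
        simp [pvSplitRec, hcu]

theorem pvSplitOn_underscore (cs : List Char) :
    PySem.Chars.splitOn cs ['_'] = pvSplitRec [] cs := by
  unfold PySem.Chars.splitOn
  simpa using pvSplitOn_go_underscore cs (cs.length + 1) [] [] (by omega)

theorem pvTitle_append (xs : List Char) : ∀ (p : Bool) (ys : List Char),
    pvTitle p (xs ++ ys) = pvTitle p xs ++ pvTitle (pvFlag p xs) ys := by
  induction xs with
  | nil => intro p ys; simp [pvTitle, pvFlag]
  | cons c t ih =>
    intro p ys
    simp only [List.cons_append, pvTitle, ih, pvFlag, List.foldl_cons, List.cons_append]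

theorem pvFlag_append_single (p : Bool) (xs : List Char) (c : Char) :
    pvFlag p (xs ++ [c]) = pvIsCased c := by
  simp [pvFlag, List.foldl_append]

-- the heart of the A side: folding title+space over the split words = title the whole
-- string, substitute '_'→' ', and add one trailing space
theorem pvMain : ∀ (cs cur k : List Char),
    (pvSplitRec cur cs).foldl (fun a w => a ++ pvTitle false w ++ [' ']) k
      = k ++ pvTitle false cur ++ ((pvTitle (pvFlag false cur) cs).map pvSub) ++ [' '] := by
  intro cs
  induction cs with
  | nil => intro cur k; simp [pvSplitRec, pvTitle]
  | cons c rest ih =>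
    intro cur k
    by_cases hc : c = '_'
    · subst hc
      rw [show pvSplitRec cur ('_' :: rest) = cur :: pvSplitRec [] rest from by
        simp [pvSplitRec]]
      rw [List.foldl_cons]
      rw [ih []]
      simp [pvTitle, pvFlag, pvTitleChar_underscore, pvSub,
        show pvIsCased '_' = false from by decide]
    · simp only [pvSplitRec, if_neg hc]
      rw [ih (cur ++ [c]) k]
      rw [pvTitle_append, pvFlag_append_single]
      simp only [pvTitle, List.map_cons,
        pvSub_titleChar (pvFlag false cur) c hc, List.append_assoc, List.cons_append,
        List.nil_append]

-- B-side bridge lemmas: Source B's char tests/cases coincide with the A-side title machinery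
theorem bCased_iff (c : Char) :
    (('a' ≤ c ∧ c ≤ 'z') ∨ ('A' ≤ c ∧ c ≤ 'Z')) ↔ pvIsCased c = true := by
  simp only [pvIsCased, Char.le_def, UInt32.le_iff_toNat_le, Bool.or_eq_true,
    Bool.and_eq_true, decide_eq_true_eq, Char.toNat]
  have ha : ('a').val.toNat = 97 := rfl
  have hz : ('z').val.toNat = 122 := rfl
  have hA : ('A').val.toNat = 65 := rfl
  have hZ : ('Z').val.toNat = 90 := rfl
  omega

theorem bUp_eq (c : Char) : bUp c = pvUpChar c := by
  unfold bUp pvUpChar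
  have : ('a' ≤ c ∧ c ≤ 'z') ↔ (97 ≤ c.toNat && c.toNat ≤ 122) = true := by
    simp only [Char.le_def, UInt32.le_iff_toNat_le, Bool.and_eq_true, decide_eq_true_eq,
      Char.toNat]
    have ha : ('a').val.toNat = 97 := rfl
    have hz : ('z').val.toNat = 122 := rfl
    omega
  by_cases h : 'a' ≤ c ∧ c ≤ 'z'
  · rw [if_pos h, if_pos (this.mp h)]
  · rw [if_neg h, if_neg (fun hh => h (this.mpr hh))]

theorem bLo_eq (c : Char) : bLo c = pvLoChar c := by
  unfold bLo pvLoChar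
  have : ('A' ≤ c ∧ c ≤ 'Z') ↔ (65 ≤ c.toNat && c.toNat ≤ 90) = true := by
    simp only [Char.le_def, UInt32.le_iff_toNat_le, Bool.and_eq_true, decide_eq_true_eq,
      Char.toNat]
    have hA : ('A').val.toNat = 65 := rfl
    have hZ : ('Z').val.toNat = 90 := rfl
    omega
  by_cases h : 'A' ≤ c ∧ c ≤ 'Z'
  · rw [if_pos h, if_pos (this.mp h)]
  · rw [if_neg h, if_neg (fun hh => h (this.mpr hh))]

-- the heart of the B side: the state machine computes title + '_'→' ' with the cased flag
theorem bFold : ∀ (cs acc : List Char) (p : Bool),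
    cs.foldl bStep (acc, p) = (acc ++ (pvTitle p cs).map pvSub, pvFlag p cs) := by
  intro cs
  induction cs with
  | nil => intro acc p; simp [pvTitle, pvFlag]
  | cons c t ih =>
    intro acc p
    rw [List.foldl_cons]
    by_cases hc : c = '_'
    · subst hc
      rw [show bStep (acc, p) '_' = (acc ++ [' '], false) from by simp [bStep]]
      rw [ih]
      simp [pvTitle, pvFlag, pvTitleChar_underscore, pvSub,
        show pvIsCased '_' = false from by decide]
    · by_cases hcs : pvIsCased c = true
      · rw [show bStep (acc, p) c
            = (acc ++ [if p then bLo c else bUp c], true) from by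
          unfold bStep; rw [if_neg hc, if_pos ((bCased_iff c).mpr hcs)]]
        rw [ih]
        have ht : pvTitleChar p c = if p then bLo c else bUp c := by
          unfold pvTitleChar; rw [if_pos hcs, bLo_eq, bUp_eq]
        have h1 : pvTitle p (c :: t) = pvTitleChar p c :: pvTitle (pvIsCased c) t := rfl
        have h2 : pvFlag p (c :: t) = pvFlag (pvIsCased c) t := rfl
        rw [h1, h2, hcs, List.map_cons, pvSub_titleChar p c hc, ht]
        simp
      · rw [show bStep (acc, p) c = (acc ++ [c], false) from by
          unfold bStep; rw [if_neg hc, if_neg (fun hh => hcs ((bCased_iff c).mp hh))]]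
        rw [ih]
        have ht : pvTitleChar p c = c := by unfold pvTitleChar; rw [if_neg hcs]
        have hs : pvSub c = c := by unfold pvSub; rw [if_neg hc]
        simp [pvTitle, pvFlag, ht, hs, Bool.eq_false_iff.mpr hcs]

theorem pvFoldl_append_singleton {α β : Type} (f : α → β) : ∀ (l : List α) (acc : List β),
    l.foldl (fun a k => a ++ [f k]) acc = acc ++ l.map f := by
  intro l
  induction l with
  | nil => intro acc; simp
  | cons x t ih => intro acc; simp [ih]

-- ===== VERDICT (by name: the statement is the Claim_ definition above) =====
theorem prettify_keys_spec : Claim_equal_prettify_keys := by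
  intro keys _
  unfold Spec_prettify_keys prettify_keys prettify_keys_alt
  rw [pvFoldl_append_singleton
    (fun key => String.ofList ((PySem.Chars.splitOn key.toList ['_']).foldl
      (fun k w => k ++ pvTitle false w ++ [' ']) ([] : List Char))) keys []]
  simp only [List.nil_append]
  refine List.map_congr_left (fun key _ => ?_)
  rw [pvSplitOn_underscore, pvMain, bFold]
  simp [pvTitle, pvFlag]
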